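-- pv_equiv track=rewrite | github.com/amix/vimrc | sources_non_forked/slimv/ftplugin/swank.py | unquote
-- ===== SOURCE A (Python) =====
-- def unquote(s):
--     if len(s) < 2:
--         return s
--     if s[0] == '"' and s[-1] == '"':
--         slist = []
--         esc = False
--         for c in s[1:-1]:
--             if not esc and c == '\\':
--                 esc = True
--             elif esc and c == 'n':
--                 esc = False
--                 slist.append('\n')
--             else:
--                 esc = False
--                 slist.append(c)
--         return "".join(slist)
--     else:
--         return s
-- ===== SOURCE B (Python) =====
-- def unquote(s):
--     if len(s) < 2:
--         return s
--     if s[0] == '"' and s[-1] == '"':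
--         inner = s[1:-1]
--         out = []
--         i = 0
--         n = len(inner)
--         while i < n:
--             c = inner[i]
--             if c == '\\':
--                 if i + 1 < n:
--                     nxt = inner[i + 1]
--                     out.append('\n' if nxt == 'n' else nxt)
--                 i += 2
--             else:
--                 out.append(c)
--                 i += 1
--         return "".join(out)
--     return s
-- ===== Notes on version B (the rewrite author's own statement) =====
-- stated objective: alternative
-- what changed: Replaces the per-character esc-flag state machine with an index loop that consumes a backslash together with its following character in one step, so no boolean escape state is carried between iterations.
import Mathlib
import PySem

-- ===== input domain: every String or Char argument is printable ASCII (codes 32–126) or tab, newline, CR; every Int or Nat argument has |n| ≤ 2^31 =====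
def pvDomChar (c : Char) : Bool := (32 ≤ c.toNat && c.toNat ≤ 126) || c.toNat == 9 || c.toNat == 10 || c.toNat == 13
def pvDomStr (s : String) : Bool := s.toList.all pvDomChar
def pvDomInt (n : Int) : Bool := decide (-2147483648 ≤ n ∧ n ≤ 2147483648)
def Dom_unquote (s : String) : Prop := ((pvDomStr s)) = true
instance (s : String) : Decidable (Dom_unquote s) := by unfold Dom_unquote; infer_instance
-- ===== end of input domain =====

-- B consumes each backslash together with its following character in one recursive step,
-- instead of A's per-character esc-flag state machine.

-- ===== PORT A =====
-- the loop body of A: state = (slist, esc)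
def unquoteStep (st : List Char × Bool) (c : Char) : List Char × Bool :=
  if st.2 = false ∧ c = '\\' then (st.1, true)
  else if st.2 = true ∧ c = 'n' then (st.1 ++ ['\n'], false)
  else (st.1 ++ [c], false)

def unquote (s : String) : String :=
  if PySem.Str.len s < 2 then s
  else if PySem.Str.pyGet? s 0 = some '"' ∧ PySem.Str.pyGet? s (-1) = some '"' then
    String.ofList ((PySem.List.slice s.toList (some 1) (some (-1))).foldl unquoteStep ([], false)).1
  else s

-- ===== PORT B =====
-- B's while-loop over the inner string, ported as recursion on the remaining characters:
-- a backslash consumes the next character too (two-at-a-time), no escape flag.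
def unquoteAltGo : List Char → List Char
  | [] => []
  | c :: rest =>
    if c = '\\' then
      match rest with
      | [] => []
      | nxt :: rest' => (if nxt = 'n' then '\n' else nxt) :: unquoteAltGo rest'
    else c :: unquoteAltGo rest

def unquote_alt (s : String) : String :=
  if PySem.Str.len s < 2 then s
  else if PySem.Str.pyGet? s 0 = some '"' ∧ PySem.Str.pyGet? s (-1) = some '"' then
    String.ofList (unquoteAltGo (PySem.List.slice s.toList (some 1) (some (-1))))
  else s

-- ===== PRECONDITION & SPEC =====
def Spec_unquote (s : String) (out : String) : Prop := out = unquote_alt s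
instance (s : String) (out : String) : Decidable (Spec_unquote s out) := by unfold Spec_unquote; infer_instance

-- ===== CLAIM (what is proved, stated in full; the proofs are below) =====
def Claim_equal_unquote : Prop := ∀ (s : String), Dom_unquote s → Spec_unquote s (unquote s)

-- ===== LEMMAS AND PROOFS =====

-- A's esc-flag fold computes the same list as B's two-at-a-time recursion.
lemma foldl_unquoteStep_eq (cs : List Char) :
    ∀ acc, (cs.foldl unquoteStep (acc, false)).1 = acc ++ unquoteAltGo cs := by
  induction cs using unquoteAltGo.induct with
  | case1 => intro acc; simp [unquoteAltGo]
  | case2 =>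
      intro acc
      simp [List.foldl, unquoteStep, unquoteAltGo]
  | case3 nxt rest' ih =>
      intro acc
      by_cases hn : nxt = 'n' <;>
        simp [List.foldl, unquoteStep, unquoteAltGo, hn, ih]
  | case4 c rest hc ih =>
      intro acc
      rw [unquoteAltGo.eq_def]
      simp [List.foldl, unquoteStep, hc, ih]

-- ===== VERDICT (by name: the statement is the Claim_ definition above) =====
theorem unquote_spec : Claim_equal_unquote := by
  intro s _
  unfold Spec_unquote unquote unquote_alt
  split
  · rfl
  · split
    · rw [foldl_unquoteStep_eq]
      simp
    · rfl
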